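-- pv_equiv track=rewrite | github.com/chaozju2016/llm_multiagent_debate | gsm/multi_gen.py | clean_repeat_suffix
-- ===== SOURCE A (Python) =====
-- def clean_repeat_suffix(text):
--     n = len(text)
--     # 从最长可能的重复长度开始尝试
--     for length in range(n//2, 10, -1):
--         # 获取末尾的子串
--         suffix = text[-length:]
--         # 在去掉末尾这段后的文本中查找这个子串
--         pos = text.find(suffix)
--
--         # 如果找到了，并且正好是末尾（pos + length == len(remaining)）
--         if pos != -1 and pos + length != n:
--             # 找到了重复，返回重复之前的部分
--             return text[:pos + length]
--     return text
-- ===== SOURCE B (Python) =====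
-- def clean_repeat_suffix(text):
--     n = len(text)
--     cap = n // 2
--     # best = largest L (capped at cap) such that the length-L suffix of text
--     # also occurs ending at some position e <= n-2; best_e = smallest such e.
--     best = 0
--     best_e = 0
--     for e in range(n - 1):
--         k = 0
--         while k < cap and k <= e and text[e - k] == text[n - 1 - k]:
--             k += 1
--         if best < k:
--             best = k
--             best_e = e
--     if best >= 11:
--         return text[:best_e + 1]
--     return text
-- ===== Notes on version B (the rewrite author's own statement) =====
-- stated objective: faster
-- what changed: Instead of trying each suffix length and rescanning the whole text with str.find (O(n^3) character comparisons), B makes one pass over end positions, computing for each the (capped) longest common suffix with the text by direct backward comparison, and keeps the maximum with its earliest position.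
import Mathlib
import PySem

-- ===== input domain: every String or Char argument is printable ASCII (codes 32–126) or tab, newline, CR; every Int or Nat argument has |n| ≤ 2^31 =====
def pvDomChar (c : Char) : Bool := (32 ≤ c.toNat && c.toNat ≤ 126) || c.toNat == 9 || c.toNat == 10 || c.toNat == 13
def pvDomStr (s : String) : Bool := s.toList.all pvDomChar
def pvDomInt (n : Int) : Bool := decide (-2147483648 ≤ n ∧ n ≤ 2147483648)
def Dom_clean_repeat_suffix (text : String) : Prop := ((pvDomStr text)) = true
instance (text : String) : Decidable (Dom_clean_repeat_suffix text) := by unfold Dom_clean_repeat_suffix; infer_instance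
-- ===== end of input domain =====

-- B replaces A's try-every-length rescans with one pass over end positions computing
-- capped longest common suffixes by direct backward comparison (measured faster).

-- ===== PORT A =====
-- A's for-loop over range(n//2, 10, -1) with early return, step for step.
def pvALoop (cs : List Char) (n : Int) (lens : List Int) : List Char :=
  match lens with
  | [] => cs
  | length :: rest =>
    let suffix := PySem.List.slice cs (some (-length)) none
    let pos := PySem.Chars.find cs suffix
    if pos ≠ -1 ∧ pos + length ≠ n then PySem.List.slice cs none (some (pos + length))
    else pvALoop cs n rest

def clean_repeat_suffix (text : String) : String :=
  let cs := text.toList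
  let n : Int := (cs.length : Int)
  String.ofList (pvALoop cs n (PySem.List.pyRange (PySem.Int.floordiv n 2) 10 (-1)))

-- ===== PORT B =====
-- B's inner while-loop. The `k ≤ e` guard keeps both indices of Source B's
-- `text[e-k] == text[n-1-k]` in range, so the getElem?-equality is exactly
-- Python's character comparison here.
def pvBWhile (cs : List Char) (cap e : Nat) (k : Nat) : Nat :=
  if h : k < cap ∧ k ≤ e ∧ cs[e-k]? = cs[cs.length-1-k]? then pvBWhile cs cap e (k+1) else k
termination_by cap - k
decreasing_by have := h.1; omega

def clean_repeat_suffix_alt (text : String) : String :=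
  let cs := text.toList
  let n := cs.length
  let cap := n / 2      -- Python's n // 2 on the nonnegative n = len(text): Nat division is exact
  let st := (List.range (n-1)).foldl (fun (st : Nat × Nat) e =>
      let k := pvBWhile cs cap e 0
      if st.1 < k then (k, e) else st) (0, 0)
  if 11 ≤ st.1 then String.ofList (cs.take (st.2 + 1)) else text

-- ===== PRECONDITION & SPEC =====
def Spec_clean_repeat_suffix (text : String) (out : String) : Prop := out = clean_repeat_suffix_alt text
instance (text : String) (out : String) : Decidable (Spec_clean_repeat_suffix text out) := by unfold Spec_clean_repeat_suffix; infer_instance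

-- ===== CLAIM (what is proved, stated in full; the proofs are below) =====
def Claim_equal_clean_repeat_suffix : Prop := ∀ (text : String), Dom_clean_repeat_suffix text → Spec_clean_repeat_suffix text (clean_repeat_suffix text)

-- ===== LEMMAS AND PROOFS =====

-- `pvC cs e i`: character i (counted backwards) of the block ending at e matches the suffix.
def pvC (cs : List Char) (e i : Nat) : Prop := cs[e-i]? = cs[cs.length-1-i]?

-- `pvOcc cs L e`: the length-L suffix of cs also occurs ending at position e.
def pvOcc (cs : List Char) (L e : Nat) : Prop := L ≤ e+1 ∧ ∀ j < L, pvC cs e j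

-- B's capped match length at end position e.
def pvM (cs : List Char) (e : Nat) : Nat := pvBWhile cs (cs.length/2) e 0

lemma pyRange_neg_one_nil (a b : Int) (h : a ≤ b) :
    PySem.List.pyRange a b (-1) = [] := by
  unfold PySem.List.pyRange
  norm_num
  intro h2; omega

lemma pyRange_neg_one_cons (a b : Int) (h : b < a) :
    PySem.List.pyRange a b (-1) = a :: PySem.List.pyRange (a-1) b (-1) := by
  unfold PySem.List.pyRange
  norm_num [h]
  by_cases h2 : b < a - 1
  · rw [if_pos h2]
    have h4 : (a - b).toNat = (a - 1 - b).toNat + 1 := by omega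
    rw [h4, List.range_succ_eq_map]
    simp only [List.map_cons, List.map_map, Nat.cast_zero]
    congr 1
    · ring
    · apply List.map_congr_left
      intro k _; simp [Function.comp]; ring
  · rw [if_neg h2]
    have h4 : (a - b).toNat = 1 := by omega
    rw [h4]
    simp

lemma pvBWhile_go (cs : List Char) (cap e k : Nat)
    (h : ∀ i < k, i < cap ∧ i ≤ e ∧ cs[e-i]? = cs[cs.length-1-i]?) :
    (∀ i < pvBWhile cs cap e k, i < cap ∧ i ≤ e ∧ cs[e-i]? = cs[cs.length-1-i]?) ∧
    k ≤ pvBWhile cs cap e k ∧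
    ¬ (pvBWhile cs cap e k < cap ∧ pvBWhile cs cap e k ≤ e ∧
        cs[e - pvBWhile cs cap e k]? = cs[cs.length-1-pvBWhile cs cap e k]?) := by
  revert h
  induction k using pvBWhile.induct (cs := cs) (cap := cap) (e := e) with
  | case1 k hc ih =>
    intro h
    rw [pvBWhile, dif_pos hc]
    obtain ⟨a1, a2, a3⟩ := ih (by intro i hi; rcases Nat.lt_succ_iff_lt_or_eq.mp hi with h'|h'; exact h i h'; exact h' ▸ hc)
    exact ⟨a1, by omega, a3⟩
  | case2 k hc =>
    intro h
    rw [pvBWhile, dif_neg hc]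
    exact ⟨h, le_refl _, hc⟩

lemma le_M_iff (cs : List Char) (e j : Nat) :
    j ≤ pvM cs e ↔ (j ≤ cs.length/2 ∧ j ≤ e+1 ∧ ∀ i < j, pvC cs e i) := by
  unfold pvM pvC
  obtain ⟨hall, -, hstop⟩ := pvBWhile_go cs (cs.length/2) e 0 (by omega)
  constructor
  · intro hj
    rcases Nat.eq_zero_or_pos j with h0|h0
    · subst h0; exact ⟨Nat.zero_le _, Nat.zero_le _, by omega⟩
    · have := hall (j-1) (by omega)
      exact ⟨by omega, by omega, fun i hi => (hall i (by omega)).2.2⟩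
  · rintro ⟨hjc, hje, hch⟩
    by_contra hlt
    rw [not_le] at hlt
    exact hstop ⟨by omega, by omega, hch _ hlt⟩

lemma prefix_char (cs : List Char) (L s : Nat) (h1 : 1 ≤ L) (h2 : L ≤ cs.length) :
    (cs.drop (cs.length - L) <+: cs.drop s) ↔ (s + L ≤ cs.length ∧ ∀ j < L, pvC cs (s+L-1) j) := by
  set n := cs.length with hn
  have hlen : (cs.drop (n-L)).length = L := by simp [hn]; omega
  have key : (cs.drop (n - L) <+: cs.drop s) ↔ (s + L ≤ n ∧ ∀ i < L, cs[s+i]? = cs[n-L+i]?) := by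
    constructor
    · intro h
      have heq := List.prefix_iff_eq_take.mp h
      rw [hlen] at heq
      have hsl : s + L ≤ n := by
        have := congrArg List.length heq
        simp [hn] at this
        omega
      refine ⟨hsl, fun i hi => ?_⟩
      have := congrArg (fun l => l[i]?) heq
      simp only [List.getElem?_take, List.getElem?_drop] at this
      rw [if_pos hi] at this
      exact this.symm
    · rintro ⟨hsl, hch⟩
      rw [List.prefix_iff_eq_take, hlen]
      apply List.ext_getElem?
      intro i
      by_cases hi : i < L
      · simp only [List.getElem?_take, List.getElem?_drop, if_pos hi]
        exact (hch i hi).symm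
      · rw [List.getElem?_eq_none_iff.mpr (by rw [hlen]; omega)]
        rw [List.getElem?_eq_none_iff.mpr (by simp; omega)]
  rw [key]
  constructor
  · rintro ⟨hsl, h⟩
    refine ⟨hsl, fun j hj => ?_⟩
    have h' := h (L-1-j) (by omega)
    unfold pvC
    rw [show s + (L-1-j) = s+L-1-j from by omega, show n-L+(L-1-j) = n-1-j from by omega] at h'
    exact h'
  · rintro ⟨hsl, h⟩
    refine ⟨hsl, fun i hi => ?_⟩
    have h' := h (L-1-i) (by omega)
    unfold pvC at h'
    rw [show s+L-1 - (L-1-i) = s+i from by omega, show n-1-(L-1-i) = n-L+i from by omega] at h'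
    exact h'

lemma occ_lt_length (cs : List Char) (L e : Nat) (h1 : 1 ≤ L) (h2 : L ≤ cs.length)
    (h : pvOcc cs L e) : e < cs.length := by
  have hc := h.2 0 (by omega)
  unfold pvC at hc
  simp only [Nat.sub_zero] at hc
  by_contra hge
  rw [List.getElem?_eq_none_iff.mpr (by omega)] at hc
  have : cs.length - 1 < cs.length := by omega
  rw [List.getElem?_eq_getElem this] at hc
  simp at hc

lemma decideA (cs : List Char) (L : Nat) (h1 : 1 ≤ L) (h2 : L ≤ cs.length) :
    0 ≤ PySem.Chars.find cs (cs.drop (cs.length - L)) ∧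
    ((PySem.Chars.find cs (cs.drop (cs.length - L)) + L ≠ (cs.length : Int)) ↔
      ∃ e, e < cs.length - 1 ∧ pvOcc cs L e) ∧
    (∀ e0, pvOcc cs L e0 → (∀ e' < e0, ¬ pvOcc cs L e') →
      PySem.Chars.find cs (cs.drop (cs.length - L)) = ((e0+1-L : Nat) : Int)) := by
  set n := cs.length with hn
  set suffix := cs.drop (n - L) with hsuf
  set pos := PySem.Chars.find cs suffix with hposdef
  have hnn : 0 ≤ pos := by
    rw [hposdef]
    exact (PySem.Chars.find_nonneg_iff cs suffix).mpr (List.IsSuffix.isInfix (List.drop_suffix _ _))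
  obtain ⟨hpre, hmin⟩ := PySem.Chars.find_spec (s := cs) (sub := suffix) hnn
  have hub : pos.toNat ≤ n - L := by
    by_contra hgt
    exact hmin (n - L) (by omega) (List.prefix_refl _)
  refine ⟨hnn, ?_, ?_⟩
  · constructor
    · intro hne
      have hlt : pos.toNat + L < n := by omega
      obtain ⟨hsl, hch⟩ := (prefix_char cs L pos.toNat h1 h2).mp hpre
      refine ⟨pos.toNat + L - 1, by omega, by omega, ?_⟩
      intro j hj
      exact hch j hj
    · rintro ⟨e, he, hLe, hch⟩
      have hs : (e+1-L) + L ≤ n := by omega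
      have hpre' : suffix <+: cs.drop (e+1-L) := by
        apply (prefix_char cs L (e+1-L) h1 h2).mpr
        refine ⟨hs, ?_⟩
        intro j hj
        rw [show e+1-L+L-1 = e from by omega]
        exact hch j hj
      have : pos.toNat ≤ e+1-L := by
        by_contra hgt
        exact hmin (e+1-L) (by omega) hpre'
      omega
  · intro e0 hocc hminocc
    have he0n : e0 < n := occ_lt_length cs L e0 h1 h2 hocc
    have hLe0 := hocc.1
    have hpre0 : suffix <+: cs.drop (e0+1-L) := by
      apply (prefix_char cs L (e0+1-L) h1 h2).mpr
      refine ⟨by omega, ?_⟩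
      intro j hj
      rw [show e0+1-L+L-1 = e0 from by omega]
      exact hocc.2 j hj
    have hle : pos.toNat ≤ e0+1-L := by
      by_contra hgt
      exact hmin (e0+1-L) (by omega) hpre0
    have hge : e0+1-L ≤ pos.toNat := by
      by_contra hlt
      obtain ⟨hsl, hch⟩ := (prefix_char cs L pos.toNat h1 h2).mp hpre
      exact hminocc (pos.toNat + L - 1) (by omega) ⟨by omega, hch⟩
    omega

lemma foldArgmax (g : Nat → Nat) (c : Nat) :
    (∀ e < c, g e ≤ ((List.range c).foldl (fun st e => if st.1 < g e then (g e, e) else st) ((0,0) : Nat × Nat)).1) ∧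
    (((List.range c).foldl (fun st e => if st.1 < g e then (g e, e) else st) ((0,0) : Nat × Nat)) = (0,0) ∨
      (((List.range c).foldl (fun st e => if st.1 < g e then (g e, e) else st) ((0,0) : Nat × Nat)).2 < c ∧
       g ((List.range c).foldl (fun st e => if st.1 < g e then (g e, e) else st) ((0,0) : Nat × Nat)).2
         = ((List.range c).foldl (fun st e => if st.1 < g e then (g e, e) else st) ((0,0) : Nat × Nat)).1 ∧
       ∀ e < ((List.range c).foldl (fun st e => if st.1 < g e then (g e, e) else st) ((0,0) : Nat × Nat)).2,
         g e < ((List.range c).foldl (fun st e => if st.1 < g e then (g e, e) else st) ((0,0) : Nat × Nat)).1)) := by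
  induction c with
  | zero => simp
  | succ c ih =>
    obtain ⟨ih1, ih2⟩ := ih
    set st := ((List.range c).foldl (fun st e => if st.1 < g e then (g e, e) else st) ((0,0) : Nat × Nat)) with hst
    rw [List.range_succ, List.foldl_append]
    simp only [List.foldl_cons, List.foldl_nil, ← hst]
    by_cases hc : st.1 < g c
    · rw [if_pos hc]
      refine ⟨?_, Or.inr ⟨by omega, rfl, ?_⟩⟩
      · intro e he
        rcases Nat.lt_succ_iff_lt_or_eq.mp he with h'|h'
        · exact le_of_lt (lt_of_le_of_lt (ih1 e h') hc)
        · subst h'; rfl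
      · intro e he
        exact lt_of_le_of_lt (ih1 e he) hc
    · rw [if_neg hc]
      refine ⟨?_, ?_⟩
      · intro e he
        rcases Nat.lt_succ_iff_lt_or_eq.mp he with h'|h'
        · exact ih1 e h'
        · subst h'; omega
      · rcases ih2 with h'|⟨ha, hb, hcc⟩
        · exact Or.inl h'
        · exact Or.inr ⟨by omega, hb, hcc⟩

lemma runA (cs : List Char) (best beste : Nat)
    (hG1 : ∀ e < cs.length - 1, pvM cs e ≤ best)
    (hG2 : best = 0 ∨ (beste < cs.length - 1 ∧ pvM cs beste = best ∧ ∀ e < beste, pvM cs e < best)) :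
    ∀ c : Nat, c ≤ cs.length/2 → best ≤ c →
    pvALoop cs (cs.length : Int) (PySem.List.pyRange (c : Int) 10 (-1)) =
      (if 11 ≤ best then cs.take (beste+1) else cs) := by
  intro c
  induction c with
  | zero =>
    intro _ hbc
    rw [pyRange_neg_one_nil _ _ (by norm_num)]
    rw [if_neg (by omega)]
    rfl
  | succ c ih =>
    intro hcap hbc
    by_cases h10 : (10:Int) < ((c:Int)+1)
    · rw [show ((c+1 : Nat) : Int) = (c:Int)+1 from by push_cast; ring,
         pyRange_neg_one_cons _ _ h10]
      have hL1 : 1 ≤ c+1 := by omega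
      have hL2 : c+1 ≤ cs.length := by
        have := Nat.div_le_self cs.length 2
        omega
      obtain ⟨hnn, hiff, hminpos⟩ := decideA cs (c+1) hL1 hL2
      have hsufeq : PySem.List.slice cs (some (-((c:Int)+1))) none = cs.drop (cs.length - (c+1)) := by
        rw [show -((c:Int)+1) = -((c+1 : Nat) : Int) from by push_cast; ring]
        exact PySem.List.slice_from_neg_natCast cs (c+1) (by omega)
      by_cases hcase : c+1 ≤ best
      · have hbeq : best = c+1 := le_antisymm hbc hcase
        have hb0 : best ≠ 0 := by omega
        rcases hG2 with h'|⟨ha, hb, hmin⟩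
        · exact absurd h' hb0
        · have hocc : pvOcc cs (c+1) beste := by
            have := (le_M_iff cs beste (c+1)).mp (by omega)
            exact ⟨this.2.1, this.2.2⟩
          have hgood : ∃ e, e < cs.length - 1 ∧ pvOcc cs (c+1) e := ⟨beste, ha, hocc⟩
          show pvALoop cs _ (_ :: _) = _
          rw [pvALoop]
          simp only [hsufeq]
          rw [if_pos ⟨by omega, by
            rw [show ((c:Int)+1) = ((c+1:Nat):Int) from by push_cast; ring]
            exact hiff.mpr hgood⟩]
          have hposval : PySem.Chars.find cs (cs.drop (cs.length - (c+1))) = ((beste+1-(c+1) : Nat) : Int) := by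
            apply hminpos beste hocc
            intro e' he' hocc'
            have : c+1 ≤ pvM cs e' := (le_M_iff cs e' (c+1)).mpr ⟨by omega, hocc'.1, hocc'.2⟩
            have := hmin e' he'
            omega
          rw [hposval]
          rw [show ((beste+1-(c+1) : Nat) : Int) + ((c:Int)+1) = ((beste+1 : Nat) : Int) from by
            have : c+1 ≤ beste+1 := hocc.1
            push_cast
            omega]
          rw [PySem.List.slice_to_natCast]
          rw [if_pos (by omega)]
      · rw [not_le] at hcase
        have hnot : ¬ ∃ e, e < cs.length - 1 ∧ pvOcc cs (c+1) e := by
          rintro ⟨e, he, hocc⟩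
          have : c+1 ≤ pvM cs e := (le_M_iff cs e (c+1)).mpr ⟨hcap, hocc.1, hocc.2⟩
          have := hG1 e he
          omega
        show pvALoop cs _ (_ :: _) = _
        rw [pvALoop]
        simp only [hsufeq]
        rw [if_neg (by
          rintro ⟨-, hne⟩
          apply hnot
          apply hiff.mp
          rw [show ((c+1:Nat):Int) = (c:Int)+1 from by push_cast; ring]
          exact hne)]
        rw [show (c:Int)+1-1 = ((c:Nat):Int) from by ring]
        exact ih (by omega) (by omega)
    · rw [pyRange_neg_one_nil _ _ (by push_cast at h10 ⊢; omega)]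
      rw [if_neg (by omega)]
      rfl

theorem main_eq (text : String) : clean_repeat_suffix text = clean_repeat_suffix_alt text := by
  unfold clean_repeat_suffix clean_repeat_suffix_alt
  simp only []
  set cs := text.toList with hcs
  set n := cs.length with hn
  set st := (List.range (n-1)).foldl (fun (st : Nat × Nat) e =>
      if st.1 < pvBWhile cs (n/2) e 0 then (pvBWhile cs (n/2) e 0, e) else st) ((0,0) : Nat × Nat) with hst
  obtain ⟨hG1, hG2⟩ := foldArgmax (fun e => pvBWhile cs (n/2) e 0) (n-1)
  rw [← hst] at hG1 hG2
  have hG1' : ∀ e < n - 1, pvM cs e ≤ st.1 := hG1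
  have hG2' : st.1 = 0 ∨ (st.2 < n - 1 ∧ pvM cs st.2 = st.1 ∧ ∀ e < st.2, pvM cs e < st.1) := by
    rcases hG2 with h|h
    · exact Or.inl (by rw [h])
    · exact Or.inr h
  have hbcap : st.1 ≤ n/2 := by
    rcases hG2' with h|⟨-, hb, -⟩
    · omega
    · rw [← hb]
      exact ((le_M_iff cs st.2 (pvM cs st.2)).mp le_rfl).1
  have hfd : PySem.Int.floordiv (n : Int) 2 = ((n/2 : Nat) : Int) := by
    exact_mod_cast PySem.Int.floordiv_natCast n 2
  rw [hfd, runA cs st.1 st.2 hG1' hG2' (n/2) le_rfl hbcap]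
  by_cases hc : 11 ≤ st.1
  · rw [if_pos hc, if_pos hc]
  · rw [if_neg hc, if_neg hc, hcs, String.ofList_toList]

-- ===== VERDICT (by name: the statement is the Claim_ definition above) =====
theorem clean_repeat_suffix_spec : Claim_equal_clean_repeat_suffix := by
  intro text _
  unfold Spec_clean_repeat_suffix
  exact main_eq text
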